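-- pv_equiv track=rewrite | github.com/a2d8a4v/is2021_feature_extractor_v2 | analysis_utils/get_filtered_data.py | prosPhonemes
-- ===== SOURCE A (Python) =====
-- def filterOutNumbers(phone):
--     return "".join(list(filter(lambda x: x.isalpha(), phone)))
--
-- def prosPhonemes(phonemes):
--     l_ps = len(phonemes)
--     rtn  = []
--     for i, p in enumerate(phonemes):
--         if i == 0:
--             rtn.append("{}_B".format(filterOutNumbers(p).lower()))
--         elif i != l_ps -1:
--             rtn.append("{}_I".format(filterOutNumbers(p).lower()))
--         else:
--             rtn.append("{}_E".format(filterOutNumbers(p).lower()))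
--     return rtn
-- ===== SOURCE B (Python) =====
-- def prosPhonemes(phonemes):
--     cleaned = ["".join(c for c in p if c.isalpha()).lower() for p in phonemes]
--     n = len(cleaned)
--     if n == 0:
--         suffixes = []
--     elif n == 1:
--         suffixes = ["_B"]
--     else:
--         suffixes = ["_B"] + ["_I"] * (n - 2) + ["_E"]
--     return [c + s for c, s in zip(cleaned, suffixes)]
-- ===== Notes on version B (the rewrite author's own statement) =====
-- stated objective: alternative
-- what changed: Replaces A's single per-element loop with index branches by a clean pass (map), a length-driven suffix list built once from n, and a zip-combine pass; no positional branching per element.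
import Mathlib
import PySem

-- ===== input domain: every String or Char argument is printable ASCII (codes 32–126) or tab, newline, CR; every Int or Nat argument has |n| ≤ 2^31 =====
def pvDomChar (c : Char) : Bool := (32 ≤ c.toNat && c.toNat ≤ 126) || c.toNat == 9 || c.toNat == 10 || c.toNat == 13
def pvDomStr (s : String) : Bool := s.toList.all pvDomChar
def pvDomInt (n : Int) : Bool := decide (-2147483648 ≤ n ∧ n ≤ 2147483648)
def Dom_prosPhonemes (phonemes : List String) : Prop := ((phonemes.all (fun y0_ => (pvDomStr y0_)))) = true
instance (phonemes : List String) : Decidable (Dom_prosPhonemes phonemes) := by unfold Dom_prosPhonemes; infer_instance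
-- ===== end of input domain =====

-- B replaces A's per-element positional branching inside one loop by a clean pass, a
-- length-driven suffix list and a zip-combine pass (alternative decomposition, same cost).

-- ===== PORT A =====
-- "".join(list(filter(lambda x: x.isalpha(), phone))): joining one-char strings with "";
-- exact on all inputs (String.ofList of the char list is the PySem-level join, see lemma filterOutNumbers_eq below)
def filterOutNumbers (phone : String) : String :=
  PySem.Str.join "" ((phone.toList.filter (fun x => PySem.Chars.isalpha x)).map (fun c => String.ofList [c]))

def prosPhonemes (phonemes : List String) : List String :=
  let l_ps : Int := (phonemes.length : Int)
  (PySem.List.enumerate phonemes).foldl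
    (fun rtn ip =>
      if ip.1 == 0 then rtn ++ [PySem.Str.lower (filterOutNumbers ip.2) ++ "_B"]
      else if ip.1 != l_ps - 1 then rtn ++ [PySem.Str.lower (filterOutNumbers ip.2) ++ "_I"]
      else rtn ++ [PySem.Str.lower (filterOutNumbers ip.2) ++ "_E"]) []

-- ===== PORT B =====
def cleanPhone (p : String) : String :=
  PySem.Str.lower (String.ofList (p.toList.filter (fun c => PySem.Chars.isalpha c)))

def suffixesFor (n : Nat) : List String :=
  if n = 0 then []
  else if n = 1 then ["_B"]
  else "_B" :: (List.replicate (n - 2) "_I" ++ ["_E"])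

def prosPhonemes_alt (phonemes : List String) : List String :=
  let cleaned := phonemes.map cleanPhone
  let suffixes := suffixesFor cleaned.length
  (cleaned.zip suffixes).map (fun cs => cs.1 ++ cs.2)

-- ===== PRECONDITION & SPEC =====
def Spec_prosPhonemes (phonemes : List String) (out : List String) : Prop := out = prosPhonemes_alt phonemes
instance (phonemes : List String) (out : List String) : Decidable (Spec_prosPhonemes phonemes out) := by unfold Spec_prosPhonemes; infer_instance

-- ===== CLAIM (what is proved, stated in full; the proofs are below) =====
def Claim_equal_prosPhonemes : Prop := ∀ (phonemes : List String), Dom_prosPhonemes phonemes → Spec_prosPhonemes phonemes (prosPhonemes phonemes)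

-- ===== LEMMAS AND PROOFS =====

-- the positional tag A's branches pick at index i for a list of length n
def tagOf (n : Int) (i : Int) : String := if i == 0 then "_B" else if i != n - 1 then "_I" else "_E"

theorem filterOutNumbers_eq (p : String) :
    filterOutNumbers p = String.ofList (p.toList.filter (fun c => PySem.Chars.isalpha c)) := by
  have h : (filterOutNumbers p).toList = p.toList.filter (fun c => PySem.Chars.isalpha c) := by
    unfold filterOutNumbers
    rw [PySem.Str.toList_join]
    have : (List.map String.toList ((p.toList.filter (fun x => PySem.Chars.isalpha x)).map (fun c => String.ofList [c])))
        = (p.toList.filter (fun x => PySem.Chars.isalpha x)).map (fun c => [c]) := by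
      simp
    rw [this]
    simp [PySem.Chars.join_nil_singletons]
  calc filterOutNumbers p = String.ofList (filterOutNumbers p).toList := (String.ofList_toList).symm
    _ = _ := by rw [h]

theorem prosPhonemes_eq_map (xs : List String) :
    prosPhonemes xs
      = (PySem.List.enumerate xs).map (fun ip => cleanPhone ip.2 ++ tagOf (xs.length : Int) ip.1) := by
  have hfun : (fun (rtn : List String) (ip : Int × String) =>
      if ip.1 == 0 then rtn ++ [PySem.Str.lower (filterOutNumbers ip.2) ++ "_B"]
      else if ip.1 != (xs.length : Int) - 1 then rtn ++ [PySem.Str.lower (filterOutNumbers ip.2) ++ "_I"]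
      else rtn ++ [PySem.Str.lower (filterOutNumbers ip.2) ++ "_E"])
      = (fun rtn ip => rtn ++ [cleanPhone ip.2 ++ tagOf (xs.length : Int) ip.1]) := by
    funext rtn ip
    have hc : PySem.Str.lower (filterOutNumbers ip.2) = cleanPhone ip.2 := by
      rw [filterOutNumbers_eq]; rfl
    by_cases h0 : ip.1 = 0
    · simp [tagOf, h0, hc]
    · by_cases h1 : ip.1 = (xs.length : Int) - 1
      · have h2 : ((xs.length : Int) - 1) ≠ 0 := by omega
        simp [tagOf, h1, h2, hc]
      · simp [tagOf, h0, h1, hc]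
  show (PySem.List.enumerate xs).foldl _ [] = _
  rw [hfun, PySem.List.foldl_append_singleton_eq_map]
  simp

theorem suffixesFor_get (n k : Nat) (hk : k < n) :
    (suffixesFor n)[k]? = some (tagOf (n : Int) (k : Int)) := by
  unfold suffixesFor tagOf
  match n, hk with
  | 1, _ =>
    have hk0 : k = 0 := by omega
    simp [hk0]
  | (m + 2), hk =>
    cases k with
    | zero => simp
    | succ j =>
      have h0 : ¬ (((j : Int) + 1) = 0) := by omega
      by_cases hj : j < m
      · have h1 : ((j : Int) + 1) ≠ (m : Int) + 2 - 1 := by omega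
        simp [List.getElem?_append, hj, h0, h1]
      · have hjm : j = m := by omega
        have hb : (m : Int) + 1 = (m : Int) + 2 - 1 := by omega
        have hc2 : ¬ ((m : Int) + 2 - 1 = 0) := by omega
        simp [hjm, hb, hc2]

-- ===== VERDICT (by name: the statement is the Claim_ definition above) =====
theorem prosPhonemes_spec : Claim_equal_prosPhonemes := by
  intro xs _
  unfold Spec_prosPhonemes prosPhonemes_alt
  rw [prosPhonemes_eq_map]
  simp only [List.length_map]
  apply List.ext_getElem?
  intro k
  rw [List.zip_eq_zipWith]
  simp only [List.getElem?_map, List.getElem?_zipWith, PySem.List.getElem?_enumerate]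
  by_cases hk : k < xs.length
  · obtain ⟨x, hx⟩ : ∃ x, xs[k]? = some x := ⟨xs[k], List.getElem?_eq_getElem hk⟩
    rw [hx, suffixesFor_get xs.length k hk]
    simp
  · have hx : xs[k]? = none := List.getElem?_eq_none (by omega)
    simp [hx]
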